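-- pv_equiv track=rewrite | github.com/CamGit80/PyQuote | main.py | get_paragraph
-- ===== SOURCE A (Python) =====
-- def get_paragraph(text):
-- 	looped = 0
-- 	list_item = 0
-- 	paragraph_list = [" x "]
--
-- 	for item in text:
-- 		if len(text[looped]) > 50:
-- 			paragraph_list[list_item] += text[looped]
--
-- 		else:
-- 			paragraph_list[list_item] += text[looped]
-- 			#this is done to create a new list item to append into with a very unique substring. we will remove any instance of this substring in the final result
-- 			paragraph_list.append(" x ")
-- 			list_item = list_item + 1
-- 		looped = looped + 1
-- 	return(paragraph_list)
-- ===== SOURCE B (Python) =====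
-- def get_paragraph(text):
--     # breakpoint-table pass, then a slice/join segment pass
--     breaks = [i for i, s in enumerate(text) if len(s) <= 50]
--     result = []
--     start = 0
--     for b in breaks:
--         result.append(" x " + "".join(text[start:b + 1]))
--         start = b + 1
--     result.append(" x " + "".join(text[start:]))
--     return result
-- ===== Notes on version B (the rewrite author's own statement) =====
-- stated objective: alternative
-- what changed: A's single index-carrying loop that mutates the last list cell is replaced by two passes: first a breakpoint table of indices i with len(text[i]) <= 50, then a slice/join pass that emits one ' x '-prefixed segment per breakpoint plus the final tail segment.
import Mathlib
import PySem

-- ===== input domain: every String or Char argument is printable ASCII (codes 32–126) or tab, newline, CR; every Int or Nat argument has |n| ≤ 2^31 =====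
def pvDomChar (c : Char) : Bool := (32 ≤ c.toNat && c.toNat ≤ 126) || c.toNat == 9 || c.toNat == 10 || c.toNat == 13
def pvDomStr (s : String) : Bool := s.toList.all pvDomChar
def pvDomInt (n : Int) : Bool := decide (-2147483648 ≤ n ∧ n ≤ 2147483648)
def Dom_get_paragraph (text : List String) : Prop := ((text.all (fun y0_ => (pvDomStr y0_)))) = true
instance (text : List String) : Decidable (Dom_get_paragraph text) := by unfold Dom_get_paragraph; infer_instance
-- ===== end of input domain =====

-- B replaces A's index-carrying single loop by a breakpoint-table pass followed by a
-- slice/join segment pass (objective: alternative decomposition, same cost).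

-- ===== PORT A =====
-- paragraph_list[list_item] += s  (list_item is always in range in A's loop)
def pvCatAt : List String → Nat → String → List String
  | [], _, _ => []
  | h :: t, 0, s => (h ++ s) :: t
  | h :: t, n + 1, s => h :: pvCatAt t n s

-- 'looped' always equals the loop index, so text[looped] is the current 'item' (exact);
-- the port carries 'looped' in the state as A does.
def get_paragraph (text : List String) : List String :=
  (text.foldl
    (fun (st : List String × Nat × Nat) item =>
      let pl := st.1
      let list_item := st.2.1
      let looped := st.2.2
      if PySem.Str.len item > 50 then
        (pvCatAt pl list_item item, list_item, looped + 1)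
      else
        (pvCatAt pl list_item item ++ [" x "], list_item + 1, looped + 1))
    ([" x "], 0, 0)).1

-- ===== PORT B =====
def get_paragraph_alt (text : List String) : List String :=
  -- breaks = [i for i, s in enumerate(text) if len(s) <= 50]
  let breaks : List Nat :=
    (text.zipIdx 0).filterMap (fun p => if PySem.Str.len p.1 ≤ 50 then some p.2 else none)
  let st := breaks.foldl
    (fun (st : List String × Nat) (b : Nat) =>
      (st.1 ++ [" x " ++ PySem.Str.join "" (PySem.List.slice text (some (st.2 : Int)) (some ((b : Int) + 1)))], b + 1))
    ([], 0)
  st.1 ++ [" x " ++ PySem.Str.join "" (PySem.List.slice text (some (st.2 : Int)) none)]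

-- ===== PRECONDITION & SPEC =====
def Spec_get_paragraph (text : List String) (out : List String) : Prop := out = get_paragraph_alt text
instance (text : List String) (out : List String) : Decidable (Spec_get_paragraph text out) := by unfold Spec_get_paragraph; infer_instance

-- ===== CLAIM (what is proved, stated in full; the proofs are below) =====
def Claim_equal_get_paragraph : Prop := ∀ (text : List String), Dom_get_paragraph text → Spec_get_paragraph text (get_paragraph text)

-- ===== LEMMAS AND PROOFS =====

-- String append facts (String's ++ is kernel-opaque, so we cite the library lemmas)
theorem pvStr_append_nil (a : String) : a ++ "" = a := by
  simpa [String.ofList_append] using congrArg String.ofList (List.append_nil a.toList)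
theorem pvStr_nil_append (a : String) : "" ++ a = a := by
  simpa [String.ofList_append] using congrArg String.ofList (List.nil_append a.toList)

theorem pvJoin_nil : PySem.Str.join "" ([] : List String) = "" := by
  simp [PySem.Str.join, PySem.Chars.join_nil]

theorem pvCharsJoin_cons (a : List Char) (l : List (List Char)) :
    PySem.Chars.join [] (a :: l) = a ++ PySem.Chars.join [] l := by
  cases l with
  | nil => simp [PySem.Chars.join_singleton, PySem.Chars.join_nil]
  | cons b t => rw [PySem.Chars.join_cons_cons]; simp

theorem pvJoin_cons (a : String) (l : List String) :
    PySem.Str.join "" (a :: l) = a ++ PySem.Str.join "" l := by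
  simp [PySem.Str.join, pvCharsJoin_cons, String.ofList_append]

-- the common segment-body function both ports compute
def pvSegs : String → List String → List String
  | cur, [] => [cur]
  | cur, s :: xs =>
    if PySem.Str.len s > 50 then pvSegs (cur ++ s) xs
    else (cur ++ s) :: pvSegs "" xs

def pvMapHead (f : String → String) : List String → List String
  | [] => []
  | h :: t => f h :: t

theorem pvSegs_prepend (a b : String) (xs : List String) :
    pvSegs (a ++ b) xs = pvMapHead (a ++ ·) (pvSegs b xs) := by
  induction xs generalizing b with
  | nil => simp [pvSegs, pvMapHead]
  | cons x xs ih =>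
    by_cases h : PySem.Str.len x > 50
    · simp only [pvSegs, if_pos h, String.append_assoc, ih]
    · simp only [pvSegs, if_neg h, pvMapHead, String.append_assoc]

-- ===== A-side =====
theorem pvCatAt_append (init : List String) (c s : String) :
    pvCatAt (init ++ [c]) init.length s = init ++ [c ++ s] := by
  induction init with
  | nil => rfl
  | cons h t ih => simpa [pvCatAt] using ih

theorem pvA_fold (xs : List String) (init : List String) (cur : String) (k : Nat) :
    (xs.foldl
      (fun (st : List String × Nat × Nat) item =>
        let pl := st.1
        let list_item := st.2.1
        let looped := st.2.2
        if PySem.Str.len item > 50 then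
          (pvCatAt pl list_item item, list_item, looped + 1)
        else
          (pvCatAt pl list_item item ++ [" x "], list_item + 1, looped + 1))
      (init ++ [" x " ++ cur], init.length, k)).1
    = init ++ (pvSegs cur xs).map (" x " ++ ·) := by
  induction xs generalizing init cur k with
  | nil => simp [pvSegs]
  | cons x xs ih =>
    by_cases h : PySem.Str.len x > 50
    · simp only [List.foldl_cons, if_pos h, pvCatAt_append]
      rw [String.append_assoc]
      rw [ih init (cur ++ x) (k + 1)]
      simp only [pvSegs, if_pos h]
    · simp only [List.foldl_cons, if_neg h, pvCatAt_append]
      have h2 : (init ++ [" x " ++ cur ++ x]) ++ [" x "]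
          = (init ++ [" x " ++ (cur ++ x)]) ++ [" x " ++ ""] := by
        rw [pvStr_append_nil, String.append_assoc]
      have h3 : init.length + 1 = (init ++ [" x " ++ (cur ++ x)]).length := by simp
      rw [h2, h3, ih (init ++ [" x " ++ (cur ++ x)]) "" (k + 1)]
      simp only [pvSegs, if_neg h, List.map_cons, List.append_assoc, List.singleton_append]

theorem pvA_eq (text : List String) :
    get_paragraph text = (pvSegs "" text).map (" x " ++ ·) := by
  have h := pvA_fold text [] ("") 0
  simpa [get_paragraph, pvStr_append_nil] using h

-- ===== B-side =====
-- recursive form of B's segment pass, without the " x " prefixes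
def pvBodies (text : List String) : Nat → List Nat → List String
  | s, [] => [PySem.Str.join "" (PySem.List.slice text (some (s : Int)) none)]
  | s, b :: bs =>
    PySem.Str.join "" (PySem.List.slice text (some (s : Int)) (some ((b : Int) + 1))) :: pvBodies text (b + 1) bs

def pvBrk (xs : List String) (s : Nat) : List Nat :=
  (xs.zipIdx s).filterMap (fun p => if PySem.Str.len p.1 ≤ 50 then some p.2 else none)

theorem pvB_fold (text : List String) (bs : List Nat) (acc : List String) (s : Nat) :
    (let st := bs.foldl
        (fun (st : List String × Nat) (b : Nat) =>
          (st.1 ++ [" x " ++ PySem.Str.join "" (PySem.List.slice text (some (st.2 : Int)) (some ((b : Int) + 1)))], b + 1))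
        (acc, s)
     st.1 ++ [" x " ++ PySem.Str.join "" (PySem.List.slice text (some (st.2 : Int)) none)])
    = acc ++ (pvBodies text s bs).map (" x " ++ ·) := by
  induction bs generalizing acc s with
  | nil => simp [pvBodies]
  | cons b bs ih =>
    simp only [List.foldl_cons]
    rw [ih]
    simp [pvBodies]

theorem pvBrk_cons (x : String) (xs : List String) (s : Nat) :
    pvBrk (x :: xs) s
      = if PySem.Str.len x ≤ 50 then s :: pvBrk xs (s + 1) else pvBrk xs (s + 1) := by
  simp only [pvBrk, List.zipIdx_cons, List.filterMap_cons]
  by_cases h : PySem.Str.len x ≤ 50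
  · rw [if_pos h, if_pos h]
  · rw [if_neg h, if_neg h]

theorem pvBrk_ge (xs : List String) (s : Nat) : ∀ b ∈ pvBrk xs s, s ≤ b := by
  induction xs generalizing s with
  | nil => simp [pvBrk]
  | cons x xs ih =>
    intro b hb
    rw [pvBrk_cons] at hb
    by_cases h : PySem.Str.len x ≤ 50
    · rw [if_pos h] at hb
      rcases List.mem_cons.mp hb with h1 | h1
      · omega
      · have := ih (s + 1) b h1; omega
    · rw [if_neg h] at hb
      have := ih (s + 1) b hb; omega

theorem pvBodies_shift (pre : List String) (x : String) (xs : List String) (bs : List Nat)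
    (h : ∀ b ∈ bs, pre.length + 1 ≤ b) :
    pvBodies (pre ++ x :: xs) pre.length bs
      = pvMapHead (x ++ ·) (pvBodies (pre ++ x :: xs) (pre.length + 1) bs) := by
  have hdrop : (pre ++ x :: xs).drop pre.length = x :: xs := by
    simpa using List.drop_left (l₁ := pre) (l₂ := x :: xs)
  have hdrop1 : (pre ++ x :: xs).drop (pre.length + 1) = xs := by
    have : pre ++ x :: xs = (pre ++ [x]) ++ xs := by simp
    rw [this]
    simpa using List.drop_left (l₁ := pre ++ [x]) (l₂ := xs)
  cases bs with
  | nil =>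
    simp only [pvBodies, pvMapHead, PySem.List.slice_from_natCast, hdrop, hdrop1, pvJoin_cons]
  | cons b bs =>
    have hb : pre.length + 1 ≤ b := h b (List.mem_cons_self ..)
    have hc : ((b : Int) + 1) = ((b + 1 : Nat) : Int) := by push_cast; ring
    simp only [pvBodies, pvMapHead, hc, PySem.List.slice_natCast, hdrop, hdrop1]
    have h1 : b + 1 - pre.length = (b - pre.length) + 1 := by omega
    have h2 : b + 1 - (pre.length + 1) = b - pre.length := by omega
    rw [h1, h2, List.take_succ_cons, pvJoin_cons]

theorem pvB_main (xs : List String) (pre : List String) :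
    pvBodies (pre ++ xs) pre.length (pvBrk xs pre.length) = pvSegs "" xs := by
  induction xs generalizing pre with
  | nil =>
    simp [pvBrk, pvBodies, pvSegs, PySem.List.slice_from_natCast, pvJoin_nil]
  | cons x xs ih =>
    rw [pvBrk_cons]
    have hpre : pre ++ x :: xs = (pre ++ [x]) ++ xs := by simp
    have hlen : pre.length + 1 = (pre ++ [x]).length := by simp
    by_cases h : PySem.Str.len x ≤ 50
    · rw [if_pos h]
      have hc : ((pre.length : Int) + 1) = ((pre.length + 1 : Nat) : Int) := by push_cast; ring
      simp only [pvBodies, hc, PySem.List.slice_natCast]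
      have hdrop : (pre ++ x :: xs).drop pre.length = x :: xs := by
        simpa using List.drop_left (l₁ := pre) (l₂ := x :: xs)
      have h1 : pre.length + 1 - pre.length = 1 := by omega
      rw [hdrop, h1, List.take_succ_cons, List.take_zero, pvJoin_cons, pvJoin_nil,
        pvStr_append_nil]
      have htail : pvBodies (pre ++ x :: xs) (pre.length + 1) (pvBrk xs (pre.length + 1))
          = pvSegs "" xs := by
        rw [hpre, hlen]; exact ih (pre ++ [x])
      rw [htail]
      have hx : ¬ PySem.Str.len x > 50 := by omega
      simp only [pvSegs, if_neg hx, pvStr_nil_append]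
    · rw [if_neg h]
      have hge : ∀ b ∈ pvBrk xs (pre.length + 1), pre.length + 1 ≤ b :=
        pvBrk_ge xs (pre.length + 1)
      rw [pvBodies_shift pre x xs _ hge]
      have htail : pvBodies (pre ++ x :: xs) (pre.length + 1) (pvBrk xs (pre.length + 1))
          = pvSegs "" xs := by
        rw [hpre, hlen]; exact ih (pre ++ [x])
      rw [htail]
      have hx : PySem.Str.len x > 50 := by omega
      have hs : pvSegs x xs = pvMapHead (x ++ ·) (pvSegs "" xs) := by
        have := pvSegs_prepend x "" xs
        rwa [pvStr_append_nil] at this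
      simp only [pvSegs, if_pos hx, pvStr_nil_append, hs]

theorem pvB_eq (text : List String) :
    get_paragraph_alt text = (pvSegs "" text).map (" x " ++ ·) := by
  have h2 : pvBodies text 0 (pvBrk text 0) = pvSegs "" text := by
    simpa using pvB_main text []
  rw [← h2]
  simpa [get_paragraph_alt, pvBrk] using pvB_fold text (pvBrk text 0) [] 0

-- ===== VERDICT (by name: the statement is the Claim_ definition above) =====
theorem get_paragraph_spec : Claim_equal_get_paragraph := by
  intro text _
  show get_paragraph text = get_paragraph_alt text
  rw [pvA_eq, pvB_eq]
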